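-- pv_equiv track=rewrite | github.com/Python-BI-2023/HW4_Functions2 | HW4_Gorbarenko/amino_analyzer.py | peptide_cutter
-- ===== SOURCE A (Python) =====
-- def peptide_cutter(sequence: str, enzyme: str = "trypsin") -> str:
--     """
--     This function identifies cleavage sites in a given peptide sequence using a specified enzyme.
--
--     Args:
--         sequence (str): The input peptide sequence.
--         enzyme (str): The enzyme to be used for cleavage. Choose between "trypsin" and "chymotrypsin". Default is "trypsin".
--
--     Returns:
--         str: A message indicating the number and positions of cleavage sites, or an error message if an invalid enzyme is provided.
--     """
--     cleavage_sites = []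
--     if enzyme not in ("trypsin", "chymotrypsin"):
--         return "You have chosen an enzyme that is not provided. Please choose between trypsin and chymotrypsin."
--
--     if enzyme == "trypsin":  # Trypsin cuts peptide chains mainly at the carboxyl side of the amino acids lysine or arginine.
--         for i in range(len(sequence)-1):
--             if sequence[i] in ['K', 'R', 'k', 'r'] and sequence[i+1] not in ['P','p']:
--                 cleavage_sites.append(i+1)
--
--     if enzyme == "chymotrypsin":  # Chymotrypsin preferentially cleaves at Trp, Tyr and Phe in position P1(high specificity)
--         for i in range(len(sequence)-1):
--             if sequence[i] in ['W', 'Y', 'F', 'w', 'y', 'f'] and sequence[i+1] not in ['P','p']: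
--                 cleavage_sites.append(i+1)
--
--     if cleavage_sites:
--         return f"Found {len(cleavage_sites)} {enzyme} cleavage sites at positions {', '.join(map(str, cleavage_sites))}"
--     else:
--         return f"No {enzyme} cleavage sites were found."
-- ===== SOURCE B (Python) =====
-- def peptide_cutter(sequence: str, enzyme: str = "trypsin") -> str:
--     if enzyme == "trypsin":
--         targets = "KRkr"
--     elif enzyme == "chymotrypsin":
--         targets = "WYFwyf"
--     else:
--         return "You have chosen an enzyme that is not provided. Please choose between trypsin and chymotrypsin."
--     # Staged strategy: collect, per target residue, every index where it occurs,
--     # merge the per-residue index lists by sorting, then filter by the successor rule.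
--     hits = []
--     for t in targets:
--         hits.extend(i for i, c in enumerate(sequence) if c == t)
--     hits.sort()
--     cleavage_sites = [i + 1 for i in hits
--                       if i + 1 < len(sequence) and sequence[i + 1] not in "Pp"]
--     if cleavage_sites:
--         return f"Found {len(cleavage_sites)} {enzyme} cleavage sites at positions {', '.join(map(str, cleavage_sites))}"
--     else:
--         return f"No {enzyme} cleavage sites were found."
-- ===== Notes on version B (the rewrite author's own statement) =====
-- stated objective: alternative
-- what changed: Instead of A's single index loop testing the pair condition at each position, B makes one pass per target residue collecting that residue's occurrence indices, merges the per-residue lists by sorting, and then filters the sorted hits by the successor-not-proline rule in a final pass.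
import Mathlib
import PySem

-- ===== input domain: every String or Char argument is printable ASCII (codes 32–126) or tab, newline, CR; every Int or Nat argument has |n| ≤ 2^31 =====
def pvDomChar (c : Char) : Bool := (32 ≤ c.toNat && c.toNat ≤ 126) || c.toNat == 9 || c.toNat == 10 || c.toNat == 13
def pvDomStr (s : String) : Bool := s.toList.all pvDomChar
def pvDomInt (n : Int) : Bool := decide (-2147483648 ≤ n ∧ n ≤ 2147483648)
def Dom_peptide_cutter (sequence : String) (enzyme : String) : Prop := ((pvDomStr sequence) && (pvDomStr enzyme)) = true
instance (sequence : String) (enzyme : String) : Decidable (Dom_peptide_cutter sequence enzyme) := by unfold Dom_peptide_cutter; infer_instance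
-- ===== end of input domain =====

-- B replaces A's single pair-testing index loop by staged passes: one occurrence-index pass per
-- target residue, a sort merging the per-residue lists, then a successor-rule filter; objective: alternative.

-- ===== PORT A =====
-- sequence[i] in A's loops; the loop index is always in range, so the default is never read
def pvCharAtA (sequence : String) (i : Int) : Char :=
  PySem.List.pyGetD sequence.toList i ' '

def peptide_cutter (sequence : String) (enzyme : String) : String :=
  let cleavage_sites : List Int := []
  if ¬ (enzyme = "trypsin" ∨ enzyme = "chymotrypsin") then
    "You have chosen an enzyme that is not provided. Please choose between trypsin and chymotrypsin."
  else
    let cleavage_sites : List Int :=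
      if enzyme = "trypsin" then
        (PySem.List.pyRange 0 (PySem.Str.len sequence - 1) 1).foldl
          (fun acc i =>
            if pvCharAtA sequence i ∈ (['K', 'R', 'k', 'r'] : List Char) ∧
                pvCharAtA sequence (i + 1) ∉ (['P', 'p'] : List Char)
            then acc ++ [i + 1] else acc) cleavage_sites
      else cleavage_sites
    let cleavage_sites : List Int :=
      if enzyme = "chymotrypsin" then
        (PySem.List.pyRange 0 (PySem.Str.len sequence - 1) 1).foldl
          (fun acc i =>
            if pvCharAtA sequence i ∈ (['W', 'Y', 'F', 'w', 'y', 'f'] : List Char) ∧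
                pvCharAtA sequence (i + 1) ∉ (['P', 'p'] : List Char)
            then acc ++ [i + 1] else acc) cleavage_sites
      else cleavage_sites
    if cleavage_sites ≠ [] then
      "Found " ++ PySem.Int.toStr (PySem.List.len cleavage_sites) ++ " " ++ enzyme ++
        " cleavage sites at positions " ++
        PySem.Str.join ", " (cleavage_sites.map PySem.Int.toStr)
    else
      "No " ++ enzyme ++ " cleavage sites were found."

-- ===== PORT B =====
def peptide_cutter_alt (sequence : String) (enzyme : String) : String :=
  let targets? : Option String :=
    if enzyme = "trypsin" then some "KRkr"
    else if enzyme = "chymotrypsin" then some "WYFwyf"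
    else none
  match targets? with
  | none =>
    "You have chosen an enzyme that is not provided. Please choose between trypsin and chymotrypsin."
  | some targets =>
    let cs : List Char := sequence.toList
    -- per-residue occurrence passes, appended in residue order
    let hits : List Int :=
      targets.toList.foldl
        (fun acc t =>
          acc ++ (PySem.List.enumerate cs 0).filterMap
            (fun p => if p.2 = t then some p.1 else none)) []
    -- merge by sorting
    let hits : List Int := PySem.List.sorted hits (fun x => x) false
    -- successor-rule filter
    let cleavage_sites : List Int :=
      hits.filterMap (fun i =>
        if i + 1 < PySem.List.len cs ∧
            PySem.List.pyGetD cs (i + 1) ' ' ∉ (['P', 'p'] : List Char)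
        then some (i + 1) else none)
    if cleavage_sites ≠ [] then
      "Found " ++ PySem.Int.toStr (PySem.List.len cleavage_sites) ++ " " ++ enzyme ++
        " cleavage sites at positions " ++
        PySem.Str.join ", " (cleavage_sites.map PySem.Int.toStr)
    else
      "No " ++ enzyme ++ " cleavage sites were found."

-- ===== PRECONDITION & SPEC =====
def Spec_peptide_cutter (sequence : String) (enzyme : String) (out : String) : Prop := out = peptide_cutter_alt sequence enzyme
instance (sequence : String) (enzyme : String) (out : String) : Decidable (Spec_peptide_cutter sequence enzyme out) := by unfold Spec_peptide_cutter; infer_instance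

-- ===== CLAIM (what is proved, stated in full; the proofs are below) =====
def Claim_equal_peptide_cutter : Prop := ∀ (sequence : String) (enzyme : String), Dom_peptide_cutter sequence enzyme → Spec_peptide_cutter sequence enzyme (peptide_cutter sequence enzyme)

-- ===== LEMMAS AND PROOFS =====

-- one residue's occurrence pass, appended before the remaining residues' hits, is a permutation
-- of the combined filter (t ∉ T': the two predicates are disjoint)
theorem pv_perm_split (E : List (Int × Char)) (t : Char) (T' : List Char) (ht : t ∉ T') :
    (E.filterMap (fun p => if p.2 = t then some p.1 else none) ++
      (E.filter (fun p => decide (p.2 ∈ T'))).map (·.1)).Perm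
    ((E.filter (fun p => decide (p.2 ∈ t :: T'))).map (·.1)) := by
  induction E with
  | nil => simp
  | cons p E ih =>
    simp only [List.filterMap_cons, List.filter_cons]
    by_cases h1 : p.2 = t
    · have h2 : p.2 ∉ T' := h1 ▸ ht
      rw [if_pos h1, if_neg (by simpa using h2), if_pos (by simp [h1])]
      simpa using ih.cons p.1
    · by_cases h2 : p.2 ∈ T'
      · rw [if_neg h1, if_pos (by simpa using h2), if_pos (by simp [h2])]
        simpa using (List.perm_middle).trans (ih.cons p.1)
      · rw [if_neg h1, if_neg (by simpa using h2), if_neg (by simp [h1, h2])]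
        exact ih

-- the per-residue passes, concatenated, are a permutation of the single combined filter
theorem pv_perm_flatMap (E : List (Int × Char)) (T : List Char) (hT : T.Nodup) :
    (T.flatMap fun t => E.filterMap (fun p => if p.2 = t then some p.1 else none)).Perm
    ((E.filter (fun p => decide (p.2 ∈ T))).map (·.1)) := by
  induction T with
  | nil => simp
  | cons t T' ih =>
    rcases List.nodup_cons.mp hT with ⟨ht, hT'⟩
    rw [List.flatMap_cons]
    exact ((ih hT').append_left _).trans (pv_perm_split E t T' ht)

-- filterMap over (filter q l).map fst collapses to one filterMap over l
theorem pv_filterMap_map_filter (E : List (Int × Char)) (q : Int × Char → Bool)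
    (f : Int → Option Int) :
    ((E.filter q).map (·.1)).filterMap f
      = E.filterMap (fun p => if q p then f p.1 else none) := by
  induction E with
  | nil => rfl
  | cons p E ih =>
    by_cases h : q p
    · simp [h, List.filterMap_cons, ih]
    · simp [h, ih]

-- the site lists of the two ports agree for any duplicate-free target set T
theorem pv_sites_eq (sequence : String) (T : List Char) (hT : T.Nodup) :
    (PySem.List.sorted
        (T.foldl (fun acc t => acc ++ (PySem.List.enumerate sequence.toList 0).filterMap
          (fun p => if p.2 = t then some p.1 else none)) []) (fun x => x) false).filterMap
      (fun i => if i + 1 < PySem.List.len sequence.toList ∧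
          PySem.List.pyGetD sequence.toList (i + 1) ' ' ∉ (['P', 'p'] : List Char)
        then some (i + 1) else none)
    = (PySem.List.pyRange 0 (PySem.Str.len sequence - 1) 1).foldl
        (fun acc i =>
          if pvCharAtA sequence i ∈ T ∧ pvCharAtA sequence (i + 1) ∉ (['P', 'p'] : List Char)
          then acc ++ [i + 1] else acc) [] := by
  -- A side: foldl to flatMap
  have hbodyA : (fun (acc : List Int) (i : Int) =>
      if pvCharAtA sequence i ∈ T ∧ pvCharAtA sequence (i + 1) ∉ (['P', 'p'] : List Char)
      then acc ++ [i + 1] else acc)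
      = fun acc i => acc ++ (if pvCharAtA sequence i ∈ T ∧
          pvCharAtA sequence (i + 1) ∉ (['P', 'p'] : List Char) then [i + 1] else []) := by
    funext acc i; split_ifs <;> simp
  rw [hbodyA, PySem.List.foldl_append_eq_flatMap, PySem.List.foldl_append_eq_flatMap,
    List.nil_append, List.nil_append]
  -- B side: the sorted merge of the per-residue passes is the increasing combined filter
  have hpair : (((PySem.List.enumerate sequence.toList 0).filter
      (fun p => decide (p.2 ∈ T))).map (·.1)).Pairwise (fun a b => a < b) :=
    List.pairwise_map.mpr ((PySem.List.pairwise_lt_enumerate (xs := sequence.toList)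
      (s := 0)).sublist List.filter_sublist)
  rw [PySem.List.sorted_eq_of_perm_of_pairwise_lt _ _ (fun x => x)
      ((pv_perm_flatMap (PySem.List.enumerate sequence.toList 0) T hT).symm) hpair,
    pv_filterMap_map_filter,
    PySem.List.enumerate_eq_map_pyRange (d := ' '), List.filterMap_map,
    List.filterMap_eq_flatMap_toList]
  have hlen : PySem.List.len sequence.toList = (sequence.toList.length : Int) := by
    simp [pysem]
  rcases Nat.eq_zero_or_pos sequence.toList.length with h0 | hpos
  · have h1 : PySem.List.len sequence.toList = 0 := by rw [hlen, h0]; rfl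
    have h2 : PySem.Str.len sequence - 1 = -1 := by simp [pysem, h0]
    rw [h1, h2, PySem.List.pyRange_one_eq_nil (by omega : (0:Int) ≤ 0),
      PySem.List.pyRange_one_eq_nil (by omega : (-1:Int) ≤ 0)]
    simp
  · have hStr : PySem.Str.len sequence = (sequence.toList.length : Int) := by simp [pysem]
    have hsplit : PySem.List.pyRange 0 (PySem.List.len sequence.toList) 1
        = PySem.List.pyRange 0 ((sequence.toList.length : Int) - 1) 1
          ++ [(sequence.toList.length : Int) - 1] := by
      rw [hlen, PySem.List.pyRange_one_append 0 ((sequence.toList.length : Int) - 1)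
        (sequence.toList.length : Int) (by omega) (by omega)]
      congr 1
      rw [PySem.List.pyRange_one_cons (by omega)]
      have h : ((sequence.toList.length : Int) - 1) + 1 = (sequence.toList.length : Int) := by omega
      rw [h, PySem.List.pyRange_one_eq_nil (le_refl _)]
    rw [hsplit, hStr, List.flatMap_append]
    have hlast : ([((sequence.toList.length : Int) - 1)].flatMap fun j =>
        (((fun p => if decide (p.2 ∈ T) = true then
            (if p.1 + 1 < PySem.List.len sequence.toList ∧
              PySem.List.pyGetD sequence.toList (p.1 + 1) ' ' ∉ (['P', 'p'] : List Char)
            then some (p.1 + 1) else none) else none) ∘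
          (fun j => (j, PySem.List.pyGetD sequence.toList j ' '))) j).toList) = [] := by
      simp
    rw [hlast, List.append_nil]
    refine List.flatMap_congr ?_
    intro j hj
    rw [PySem.List.mem_pyRange_one] at hj
    obtain ⟨hj0, hjlt⟩ := hj
    have hjn : j + 1 < PySem.List.len sequence.toList := by rw [hlen]; omega
    have hc : ((sequence.toList.length : Int)) = (sequence.length : Int) := by
      simp
    have hjn' : j + 1 < (sequence.length : Int) := by omega
    simp only [Function.comp_apply, pvCharAtA]
    by_cases hm : PySem.List.pyGetD sequence.toList j ' ' ∈ T
    · by_cases hp : PySem.List.pyGetD sequence.toList (j + 1) ' ' ∈ (['P', 'p'] : List Char)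
      · simp [hm, hp]
      · simp [hm, hp, hjn']
    · simp [hm]

-- ===== VERDICT (by name: the statement is the Claim_ definition above) =====
theorem peptide_cutter_spec : Claim_equal_peptide_cutter := by
  intro sequence enzyme _
  show peptide_cutter sequence enzyme = peptide_cutter_alt sequence enzyme
  by_cases h1 : enzyme = "trypsin"
  · subst h1
    have hT : "KRkr".toList = (['K', 'R', 'k', 'r'] : List Char) := by decide
    simp only [peptide_cutter, peptide_cutter_alt, hT, reduceIte]
    rw [pv_sites_eq sequence (['K', 'R', 'k', 'r'] : List Char) (by decide)]
    simp
  · by_cases h2 : enzyme = "chymotrypsin"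
    · subst h2
      have hT : "WYFwyf".toList = (['W', 'Y', 'F', 'w', 'y', 'f'] : List Char) := by decide
      have hne : (("chymotrypsin" : String) = "trypsin") = False := by simp
      simp only [peptide_cutter, peptide_cutter_alt, hT, hne, reduceIte]
      rw [pv_sites_eq sequence (['W', 'Y', 'F', 'w', 'y', 'f'] : List Char) (by decide)]
      simp
    · simp only [peptide_cutter, peptide_cutter_alt, if_neg h1, if_neg h2]
      rw [if_pos (by simp [h1, h2])]
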